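-- pv_equiv track=rewrite | github.com/Dee66/VectorScan | tools/vectorscan/vectorscan.py | _is_risky_action
-- ===== SOURCE A (Python) =====
-- RISKY_ACTION_TERMS = (
--     # Wildcards
--     "*",
--     ":*",
--     # S3 destructive or policy changes
--     "s3:DeleteObject",
--     "s3:PutObject",
--     "s3:PutBucketPolicy",
--     "s3:DeleteBucketPolicy",
--     # RDS broad
--     "rds:*",
--     # IAM escalation
--     "iam:*",
--     "iam:PassRole",
--     "iam:CreateUser",
--     "iam:CreateAccessKey",
--     "iam:AttachUserPolicy",
--     "iam:AttachRolePolicy",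
--     # KMS risky
--     "kms:ScheduleKeyDeletion",
--     "kms:DisableKey",
--     "kms:DisableKeyRotation",
--     "kms:PutKeyPolicy",
--     # EC2 network exposure
--     "ec2:AuthorizeSecurityGroupIngress",
--     "ec2:RevokeSecurityGroupEgress",
--     "ec2:CreateSecurityGroup",
--     # CloudTrail disabling
--     "cloudtrail:StopLogging",
--     # CloudWatch Logs destructive
--     "logs:DeleteLogGroup",
-- )
--
-- def _is_risky_action(a: str) -> bool:
--     # Consider wildcards or listed risky terms
--     if a == "*" or a.endswith(":*"):
--         return True
--     for term in RISKY_ACTION_TERMS: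
--         if term == "*":
--             continue
--         if term in a:
--             return True
--     return False
-- ===== SOURCE B (Python) =====
-- RISKY_ACTION_TERMS = (
--     "*",
--     ":*",
--     "s3:DeleteObject",
--     "s3:PutObject",
--     "s3:PutBucketPolicy",
--     "s3:DeleteBucketPolicy",
--     "rds:*",
--     "iam:*",
--     "iam:PassRole",
--     "iam:CreateUser",
--     "iam:CreateAccessKey",
--     "iam:AttachUserPolicy",
--     "iam:AttachRolePolicy",
--     "kms:ScheduleKeyDeletion",
--     "kms:DisableKey",
--     "kms:DisableKeyRotation",
--     "kms:PutKeyPolicy",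
--     "ec2:AuthorizeSecurityGroupIngress",
--     "ec2:RevokeSecurityGroupEgress",
--     "ec2:CreateSecurityGroup",
--     "cloudtrail:StopLogging",
--     "logs:DeleteLogGroup",
-- )
--
--
-- def _build_trie():
--     # Prefix tree of every risky term except the bare "*" (that one is an
--     # exact-match guard).  "" marks the end of a stored term.
--     root = {}
--     for t in RISKY_ACTION_TERMS:
--         if t == "*":
--             continue
--         node = root
--         for ch in t:
--             node = node.setdefault(ch, {})
--         node[""] = True
--     return root
--
--
-- _TRIE = _build_trie()
--
--
-- def _is_risky_action(a: str) -> bool: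
--     # Exact wildcard, then multi-pattern matching with the trie: at each
--     # start offset follow the trie along the characters of `a`; hitting an
--     # end marker means some risky term occurs there as a substring.
--     if a == "*":
--         return True
--     n = len(a)
--     for i in range(n):
--         node = _TRIE
--         for j in range(i, n):
--             node = node.get(a[j])
--             if node is None:
--                 break
--             if "" in node:
--                 return True
--     return False
-- ===== Notes on version B (the rewrite author's own statement) =====
-- stated objective: alternative
-- what changed: A loops over the term tuple testing each term as a substring (plus an endswith shortcut); B builds a prefix tree (trie) of the risky terms once and answers by walking the trie from each start offset of the action string, so the inner per-term scan disappears and is replaced by a single trie descent per offset.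
import Mathlib
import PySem

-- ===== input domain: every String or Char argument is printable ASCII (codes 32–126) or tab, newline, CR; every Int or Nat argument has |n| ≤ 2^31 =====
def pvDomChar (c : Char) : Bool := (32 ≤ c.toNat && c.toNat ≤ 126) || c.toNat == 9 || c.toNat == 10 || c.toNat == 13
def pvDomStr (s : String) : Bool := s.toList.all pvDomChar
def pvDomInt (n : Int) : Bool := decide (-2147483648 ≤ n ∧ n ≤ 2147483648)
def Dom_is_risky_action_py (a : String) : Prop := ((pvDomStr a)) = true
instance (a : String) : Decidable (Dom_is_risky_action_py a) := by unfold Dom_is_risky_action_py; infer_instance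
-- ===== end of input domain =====

-- B replaces A's per-term substring loop by a prefix tree (trie) of the risky terms built once and
-- walked from each start offset; alternative data structure, same answer.

-- ===== PORT A =====
def riskyActionTerms : List String :=
  ["*", ":*",
   "s3:DeleteObject", "s3:PutObject", "s3:PutBucketPolicy", "s3:DeleteBucketPolicy",
   "rds:*",
   "iam:*", "iam:PassRole", "iam:CreateUser", "iam:CreateAccessKey",
   "iam:AttachUserPolicy", "iam:AttachRolePolicy",
   "kms:ScheduleKeyDeletion", "kms:DisableKey", "kms:DisableKeyRotation", "kms:PutKeyPolicy",
   "ec2:AuthorizeSecurityGroupIngress", "ec2:RevokeSecurityGroupEgress", "ec2:CreateSecurityGroup",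
   "cloudtrail:StopLogging",
   "logs:DeleteLogGroup"]

-- A's `for term in RISKY_ACTION_TERMS` loop, term by term
def riskyLoopA (a : String) : List String → Bool
  | [] => false
  | t :: ts =>
    if t == "*" then riskyLoopA a ts
    else if PySem.Str.isIn t a then true
    else riskyLoopA a ts

def is_risky_action_py (a : String) : Bool :=
  if a == "*" || PySem.Str.endswith a ":*" then true
  else riskyLoopA a riskyActionTerms

-- ===== PORT B =====
-- Source B's dict-of-dicts trie; an explicit child list (no nested inductive), flag = end marker ("" key)
mutual
inductive Trie : Type
  | node : Bool → TrieList → Trie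
inductive TrieList : Type
  | nil : TrieList
  | cons : Char → Trie → TrieList → TrieList
end

def TrieList.get? : TrieList → Char → Option Trie
  | .nil, _ => none
  | .cons c t rest, d => if c = d then some t else TrieList.get? rest d

-- Source B's `node.setdefault(ch, {})` chain for one term: replace-or-append along the path
def TrieList.set : TrieList → Char → Trie → TrieList
  | .nil, c, t => .cons c t .nil
  | .cons c' t' rest, c, t => if c' = c then .cons c' t rest else .cons c' t' (TrieList.set rest c t)

def Trie.insert : Trie → List Char → Trie
  | .node _ ch, [] => .node true ch
  | .node b ch, c :: cs =>
      .node b (ch.set c (((ch.get? c).getD (.node false .nil)).insert cs))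

-- Source B's trie built once from the non-"*" terms
def scanTerms : List String := riskyActionTerms.filter (fun t => t != "*")
def riskyTrie : Trie := scanTerms.foldl (fun tr t => tr.insert t.toList) (.node false .nil)

def Trie.isEnd : Trie → Bool
  | .node b _ => b

-- Source B's inner `for j in range(i, n)` loop: descend the trie, end marker after each step
def Trie.matchAt : Trie → List Char → Bool
  | _, [] => false
  | .node _ ch, c :: cs =>
      match ch.get? c with
      | none => false
      | some t => t.isEnd || t.matchAt cs

-- Source B's outer `for i in range(n)` loop: successive start offsets
def trieSweep (tr : Trie) : List Char → Bool
  | [] => false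
  | c :: rest => tr.matchAt (c :: rest) || trieSweep tr rest

def is_risky_action_py_alt (a : String) : Bool :=
  if a == "*" then true else trieSweep riskyTrie a.toList

-- ===== PRECONDITION & SPEC =====
def Spec_is_risky_action_py (a : String) (out : Bool) : Prop := out = is_risky_action_py_alt a
instance (a : String) (out : Bool) : Decidable (Spec_is_risky_action_py a out) := by unfold Spec_is_risky_action_py; infer_instance

-- ===== CLAIM (what is proved, stated in full; the proofs are below) =====
def Claim_equal_is_risky_action_py : Prop := ∀ (a : String), Dom_is_risky_action_py a → Spec_is_risky_action_py a (is_risky_action_py a)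

-- ===== LEMMAS AND PROOFS =====

-- A's loop is an `any` over the term list, skipping "*"
theorem riskyLoopA_eq_any (a : String) (ts : List String) :
    riskyLoopA a ts = ts.any (fun t => !(t == "*") && PySem.Str.isIn t a) := by
  induction ts with
  | nil => rfl
  | cons t ts ih =>
    simp only [riskyLoopA, List.any_cons, ih]
    by_cases h : (t == "*") = true
    · simp [h]
    · by_cases hin : PySem.Str.isIn t a = true <;> simp [h]

theorem get?_set_self (ch : TrieList) (c : Char) (t : Trie) :
    (ch.set c t).get? c = some t :=
  match ch with
  | .nil => by simp [TrieList.set, TrieList.get?]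
  | .cons c' t' rest => by
    by_cases h : c' = c <;>
      simp [TrieList.set, TrieList.get?, h, get?_set_self rest c t]

theorem get?_set_ne (ch : TrieList) (c d : Char) (t : Trie) (hne : c ≠ d) :
    (ch.set c t).get? d = ch.get? d :=
  match ch with
  | .nil => by simp [TrieList.set, TrieList.get?, hne]
  | .cons c' t' rest => by
    by_cases h : c' = c
    · subst h; simp [TrieList.set, TrieList.get?, hne]
    · by_cases h2 : c' = d <;>
        simp [TrieList.set, TrieList.get?, h, h2, Ne.symm hne,
          get?_set_ne rest c d t hne]

theorem matchAt_empty (cs : List Char) :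
    Trie.matchAt (.node false .nil) cs = false := by
  cases cs <;> simp [Trie.matchAt, TrieList.get?]

theorem isEnd_insert_cons (tr : Trie) (c : Char) (w : List Char) :
    Trie.isEnd (tr.insert (c :: w)) = Trie.isEnd tr := by
  cases tr; simp [Trie.insert, Trie.isEnd]

-- inserting a nonempty word adds exactly that word as a matchable prefix
theorem matchAt_insert (w : List Char) (tr : Trie) (cs : List Char) (hw : w ≠ []) :
    (tr.insert w).matchAt cs = (tr.matchAt cs || decide (w <+: cs)) := by
  induction w generalizing tr cs with
  | nil => exact absurd rfl hw
  | cons c w' ih =>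
    cases tr with
    | node b ch =>
      cases cs with
      | nil => simp [Trie.matchAt]
      | cons d cs' =>
        by_cases hcd : c = d
        · subst hcd
          simp only [Trie.insert, Trie.matchAt, get?_set_self]
          cases hw' : w' with
          | nil =>
            cases ch.get? c with
            | none => simp [Trie.insert, Trie.isEnd]
            | some t =>
              cases t
              simp [Trie.insert, Trie.isEnd]
          | cons e rest =>
            rw [← hw']
            have hw'ne : w' ≠ [] := by simp [hw']
            cases ch.get? c with
            | none =>
              simp only [Option.getD_none]
              rw [show Trie.isEnd ((Trie.node false .nil).insert w') = false by
                    rw [hw', isEnd_insert_cons]; rfl,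
                  ih (.node false .nil) cs' hw'ne, matchAt_empty]
              simp
            | some t =>
              simp only [Option.getD_some]
              rw [show Trie.isEnd (t.insert w') = Trie.isEnd t by
                    rw [hw']; exact isEnd_insert_cons t e rest,
                  ih t cs' hw'ne]
              simp [Bool.or_assoc]
        · simp only [Trie.insert, Trie.matchAt, get?_set_ne ch c d _ hcd]
          have : ¬ (c :: w' <+: d :: cs') := by
            simp [List.cons_prefix_cons, hcd]
          cases hgd : ch.get? d <;> simp [this]

-- every scan term is nonempty
theorem scanTerms_ne_nil : ∀ t ∈ scanTerms, t.toList ≠ [] := by decide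

-- the folded trie matches exactly the prefixes that are scan terms
theorem matchAt_foldl (ws : List String) (tr : Trie) (cs : List Char)
    (h : ∀ w ∈ ws, w.toList ≠ []) :
    (ws.foldl (fun tr t => tr.insert t.toList) tr).matchAt cs =
      (tr.matchAt cs || ws.any (fun w => decide (w.toList <+: cs))) := by
  induction ws generalizing tr with
  | nil => simp
  | cons w ws ih =>
    simp only [List.foldl_cons, List.any_cons]
    rw [ih _ (fun x hx => h x (by simp [hx])),
        matchAt_insert _ _ _ (h w (by simp))]
    simp [Bool.or_assoc]

theorem matchAt_riskyTrie_iff (cs : List Char) :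
    riskyTrie.matchAt cs = true ↔ ∃ t ∈ scanTerms, t.toList <+: cs := by
  rw [riskyTrie, matchAt_foldl _ _ _ scanTerms_ne_nil, matchAt_empty]
  simp

theorem sweep_eq_true_iff (cs : List Char) :
    trieSweep riskyTrie cs = true ↔ ∃ t ∈ scanTerms, ∃ j, t.toList <+: cs.drop j := by
  induction cs with
  | nil =>
    refine iff_of_false (by simp [trieSweep]) ?_
    rintro ⟨t, ht, _, hp⟩
    simp only [List.drop_nil] at hp
    exact scanTerms_ne_nil t ht (List.prefix_nil.mp hp)
  | cons c rest ih =>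
    simp only [trieSweep, Bool.or_eq_true, matchAt_riskyTrie_iff, ih]
    constructor
    · rintro (⟨t, ht, hp⟩ | ⟨t, ht, j, hp⟩)
      · exact ⟨t, ht, 0, by simpa using hp⟩
      · exact ⟨t, ht, j + 1, by simpa using hp⟩
    · rintro ⟨t, ht, j, hp⟩
      cases j with
      | zero => exact Or.inl ⟨t, ht, by simpa using hp⟩
      | succ k => exact Or.inr ⟨t, ht, k, by simpa using hp⟩

-- B's sweep finds exactly the strings containing some scan term
theorem sweep_eq_true_iff_isIn (a : String) :
    trieSweep riskyTrie a.toList = true ↔ ∃ t ∈ scanTerms, PySem.Str.isIn t a = true := by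
  rw [sweep_eq_true_iff]
  refine exists_congr fun t => and_congr_right fun _ => ?_
  rw [PySem.Str.isIn_iff_infix, PySem.Chars.exists_prefix_drop_iff_isIn,
    PySem.Chars.isIn_iff_infix]

theorem mem_scanTerms_iff (t : String) :
    t ∈ scanTerms ↔ t ∈ riskyActionTerms ∧ t ≠ "*" := by
  simp [scanTerms, List.mem_filter]

theorem colonStar_mem_scanTerms : (":*" : String) ∈ scanTerms := by decide

-- ===== VERDICT (by name: the statement is the Claim_ definition above) =====
theorem is_risky_action_py_spec : Claim_equal_is_risky_action_py := by
  intro a _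
  unfold Spec_is_risky_action_py is_risky_action_py is_risky_action_py_alt
  by_cases hstar : a = "*"
  · simp [hstar]
  · have hbeq : (a == "*") = false := by simp [hstar]
    rw [hbeq]
    simp only [Bool.false_or, Bool.false_eq_true, if_false]
    by_cases hend : PySem.Str.endswith a ":*" = true
    · rw [if_pos hend]
      symm
      rw [sweep_eq_true_iff_isIn]
      refine ⟨":*", colonStar_mem_scanTerms, ?_⟩
      rw [PySem.Str.isIn_iff_infix]
      have hsuf : (":*" : String).toList <:+ a.toList :=
        (PySem.Chars.endswith_iff a.toList (":*" : String).toList).mp (by simpa using hend)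
      exact hsuf.isInfix
    · rw [if_neg hend]
      rw [Bool.eq_iff_iff, riskyLoopA_eq_any, List.any_eq_true, sweep_eq_true_iff_isIn]
      refine exists_congr fun t => ?_
      rw [mem_scanTerms_iff]
      simp only [Bool.and_eq_true, Bool.not_eq_eq_eq_not, Bool.not_true, beq_eq_false_iff_ne]
      tauto
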